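-- pv_equiv track=rewrite | github.com/hyunwoongko/kss | kss/functions.py | split_input_texts
-- ===== SOURCE A (Python) =====
-- def split_input_texts(text):
--     input_texts = []
--     split_texts = text.split("\n")
--
--     for t in split_texts:
--         t = t.split("\t")
--         for s in t:
--             s = s.strip()
--             if len(s) > 0:
--                 input_texts.append(s)
--
--     return input_texts
-- ===== SOURCE B (Python) =====
-- def split_input_texts(text):
--     # single left-to-right character scan: flush the stripped buffer at each delimiter
--     input_texts = []
--     buf = []
--     for ch in text:
--         if ch == "\t" or ch == "\n":
--             w = "".join(buf).strip()
--             if w: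
--                 input_texts.append(w)
--             buf = []
--         else:
--             buf.append(ch)
--     w = "".join(buf).strip()
--     if w:
--         input_texts.append(w)
--     return input_texts
-- ===== Notes on version B (the rewrite author's own statement) =====
-- stated objective: alternative
-- what changed: Replaces the nested split-on-newline-then-split-on-tab loops with a single left-to-right character scan that buffers the current fragment and flushes it (stripped, kept if non-empty) at each tab/newline delimiter and at end of input.
import Mathlib
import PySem

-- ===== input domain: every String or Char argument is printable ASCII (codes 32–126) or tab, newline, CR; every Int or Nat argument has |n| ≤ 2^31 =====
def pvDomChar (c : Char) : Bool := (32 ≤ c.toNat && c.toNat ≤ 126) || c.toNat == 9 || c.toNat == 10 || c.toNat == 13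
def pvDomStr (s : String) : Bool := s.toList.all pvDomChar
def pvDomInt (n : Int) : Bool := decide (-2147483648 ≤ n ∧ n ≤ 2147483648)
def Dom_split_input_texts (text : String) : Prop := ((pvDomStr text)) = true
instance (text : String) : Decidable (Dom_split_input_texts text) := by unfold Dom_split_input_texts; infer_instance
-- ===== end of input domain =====

-- B replaces A's nested split-on-newline-then-split-on-tab loops by a single left-to-right
-- character scan with a buffer that is flushed (stripped, kept if non-empty) at each delimiter;
-- objective: alternative single-pass decomposition, same cost.

-- ===== PORT A =====
-- A: split on "\n", then split each line on "\t", strip each piece, append if non-empty.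
def split_input_texts (text : String) : List String :=
  let split_texts := PySem.Chars.splitOn text.toList ['\n']
  split_texts.foldl (fun input_texts t =>
    let tt := PySem.Chars.splitOn t ['\t']
    tt.foldl (fun acc s =>
      let s' := PySem.Chars.strip s
      if 0 < PySem.Chars.len s' then acc ++ [String.mk s'] else acc) input_texts) []

-- ===== PORT B =====
-- B: one scan over the characters, flushing the stripped buffer at '\t'/'\n' and at the end.
def split_input_texts_alt (text : String) : List String :=
  let st := text.toList.foldl (fun (st : List String × List Char) ch =>
    if ch = '\t' ∨ ch = '\n' then
      let w := PySem.Chars.strip st.2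
      (if w ≠ [] then st.1 ++ [String.mk w] else st.1, [])
    else (st.1, st.2 ++ [ch])) ([], [])
  let w := PySem.Chars.strip st.2
  if w ≠ [] then st.1 ++ [String.mk w] else st.1

-- ===== PRECONDITION & SPEC =====
def Spec_split_input_texts (text : String) (out : List String) : Prop := out = split_input_texts_alt text
instance (text : String) (out : List String) : Decidable (Spec_split_input_texts text out) := by unfold Spec_split_input_texts; infer_instance

-- ===== CLAIM (what is proved, stated in full; the proofs are below) =====
def Claim_equal_split_input_texts : Prop := ∀ (text : String), Dom_split_input_texts text → Spec_split_input_texts text (split_input_texts text)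

-- ===== LEMMAS AND PROOFS =====

def pvEmit (buf : List Char) : List String :=
  if PySem.Chars.strip buf ≠ [] then [String.mk (PySem.Chars.strip buf)] else []

def pvFilt (l : List (List Char)) : List String := l.flatMap pvEmit

-- B's loop body and final flush, named for the proofs (definitionally B's code)
def pvStep (st : List String × List Char) (ch : Char) : List String × List Char :=
  if ch = '\t' ∨ ch = '\n' then
    let w := PySem.Chars.strip st.2
    (if w ≠ [] then st.1 ++ [String.mk w] else st.1, [])
  else (st.1, st.2 ++ [ch])

def pvFlush (st : List String × List Char) : List String :=
  if PySem.Chars.strip st.2 ≠ [] then st.1 ++ [String.mk (PySem.Chars.strip st.2)] else st.1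

theorem pv_modifyHead_fun_id {α : Type} (l : List α) : List.modifyHead (fun h => h) l = l := by
  cases l <;> simp

-- splitOn with a single-character separator is List.splitOnP, via the fuelled go
theorem pv_splitOn_go (d : Char) : ∀ (fuel : Nat) (l cur : List Char) (acc : List (List Char)),
    l.length < fuel →
    PySem.Chars.splitOn.go [d] fuel l cur acc
      = acc.reverse ++ List.modifyHead (fun h => cur.reverse ++ h) (l.splitOnP (· == d)) := by
  intro fuel
  induction fuel with
  | zero => intro l cur acc h; omega
  | succ f ih =>
    intro l cur acc h
    cases l with
    | nil =>
      simp [PySem.Chars.splitOn.go, List.splitOnP_nil]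
    | cons c rest =>
      by_cases hc : c = d
      · subst hc
        have hpre : List.isPrefixOf [c] (c :: rest) = true := by
          simp [List.isPrefixOf]
        rw [PySem.Chars.splitOn.go]
        simp only [hpre, if_pos]
        rw [ih _ _ _ (by simpa using Nat.lt_of_succ_lt_succ h)]
        rw [List.splitOnP_cons, if_pos (by simp)]
        simp [pv_modifyHead_fun_id]
      · have hpre : List.isPrefixOf [d] (c :: rest) = false := by
          simp [List.isPrefixOf]
          intro h'; exact absurd h'.symm hc
        rw [PySem.Chars.splitOn.go]
        simp only [hpre, Bool.false_eq_true, if_false]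
        rw [ih _ _ _ (by simpa using Nat.lt_of_succ_lt_succ h)]
        rw [List.splitOnP_cons]
        simp only [beq_iff_eq, hc, if_false, List.modifyHead_modifyHead]
        congr 1
        apply congrFun
        congr 1
        funext h'
        simp

theorem pv_splitOn_single (cs : List Char) (d : Char) :
    PySem.Chars.splitOn cs [d] = cs.splitOnP (· == d) := by
  unfold PySem.Chars.splitOn
  rw [pv_splitOn_go d (cs.length + 1) cs [] [] (by omega)]
  simp [pv_modifyHead_fun_id]

-- A's inner tab-loop appends exactly the stripped non-empty pieces
theorem pv_innerA (pieces : List (List Char)) : ∀ (acc : List String),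
    pieces.foldl (fun acc s =>
      let s' := PySem.Chars.strip s
      if 0 < PySem.Chars.len s' then acc ++ [String.mk s'] else acc) acc
    = acc ++ pvFilt pieces := by
  induction pieces with
  | nil => intro acc; simp [pvFilt]
  | cons p ps ih =>
    intro acc
    simp only [List.foldl_cons]
    rw [ih]
    simp only [pvFilt, List.flatMap_cons, pvEmit, PySem.Chars.len_eq]
    by_cases hp : PySem.Chars.strip p = []
    · simp [hp]
    · have : 0 < (PySem.Chars.strip p).length := List.length_pos_iff.mpr hp
      rw [if_pos (by exact_mod_cast this), if_pos hp]
      simp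

-- the two nested splits segment by the union of the two delimiters
theorem pv_nest (cs : List Char) :
    (cs.splitOnP (· == '\n')).flatMap (fun t => t.splitOnP (· == '\t'))
      = cs.splitOnP (fun c => c == '\t' || c == '\n') := by
  induction cs with
  | nil => simp [List.splitOnP_nil]
  | cons c rest ih =>
    by_cases hn : c = '\n'
    · subst hn
      rw [List.splitOnP_cons, List.splitOnP_cons]
      rw [if_pos (by simp), if_pos (by simp)]
      simp [ih]
    · rw [List.splitOnP_cons]
      simp only [beq_iff_eq, hn, if_false]
      obtain ⟨h, t, hht⟩ : ∃ h t, rest.splitOnP (· == '\n') = h :: t := by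
        cases hsp : rest.splitOnP (· == '\n') with
        | nil => exact absurd hsp (List.splitOnP_ne_nil _ _)
        | cons h t => exact ⟨h, t, rfl⟩
      rw [hht, List.modifyHead_cons, List.flatMap_cons]
      by_cases ht : c = '\t'
      · subst ht
        rw [List.splitOnP_cons, if_pos (by simp)]
        rw [List.splitOnP_cons, if_pos (by simp)]
        have := ih
        rw [hht, List.flatMap_cons] at this
        simp [this]
      · rw [List.splitOnP_cons]
        simp only [beq_iff_eq, ht, if_false]
        rw [List.splitOnP_cons]
        rw [if_neg (by simp [ht, hn])]
        have := ih
        rw [hht, List.flatMap_cons] at this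
        rw [← this]
        obtain ⟨h', t', hh'⟩ : ∃ h' t', h.splitOnP (· == '\t') = h' :: t' := by
          cases hsp : h.splitOnP (· == '\t') with
          | nil => exact absurd hsp (List.splitOnP_ne_nil _ _)
          | cons h' t' => exact ⟨h', t', rfl⟩
        rw [hh']
        simp

-- A computes pvFilt of the segmentation by {'\t','\n'}
theorem pv_A_eq (text : String) :
    split_input_texts text = pvFilt (text.toList.splitOnP (fun c => c == '\t' || c == '\n')) := by
  unfold split_input_texts
  rw [pv_splitOn_single]
  have houter : ∀ (lines : List (List Char)) (acc : List String),
      lines.foldl (fun input_texts t =>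
        let tt := PySem.Chars.splitOn t ['\t']
        tt.foldl (fun acc s =>
          let s' := PySem.Chars.strip s
          if 0 < PySem.Chars.len s' then acc ++ [String.mk s'] else acc) input_texts) acc
      = acc ++ pvFilt (lines.flatMap (fun t => t.splitOnP (· == '\t'))) := by
    intro lines
    induction lines with
    | nil => intro acc; simp [pvFilt]
    | cons l ls ih =>
      intro acc
      simp only [List.foldl_cons]
      rw [pv_splitOn_single, pv_innerA, ih]
      simp [pvFilt, List.append_assoc]
  rw [houter, pv_nest]
  simp

-- B's scan from state (out, buf) flushes out ++ the filtered segmentation, head piece prefixed by buf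
theorem pv_B_gen (cs : List Char) : ∀ (out : List String) (buf : List Char),
    pvFlush (cs.foldl pvStep (out, buf))
    = out ++ pvFilt (List.modifyHead (fun h => buf ++ h)
        (cs.splitOnP (fun c => c == '\t' || c == '\n'))) := by
  induction cs with
  | nil =>
    intro out buf
    simp only [List.foldl_nil, pvFlush, List.splitOnP_nil, List.modifyHead_cons, pvFilt,
      List.flatMap_cons, List.flatMap_nil, pvEmit, List.append_nil]
    by_cases hb : PySem.Chars.strip buf = [] <;> simp [hb]
  | cons c rest ih =>
    intro out buf
    rw [List.foldl_cons, List.splitOnP_cons]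
    by_cases hd : c = '\t' ∨ c = '\n'
    · have hstep : pvStep (out, buf) c = (out ++ pvEmit buf, []) := by
        simp only [pvStep, if_pos hd, pvEmit]
        by_cases hb : PySem.Chars.strip buf = [] <;> simp [hb]
      rw [hstep, ih, if_pos (by rcases hd with h | h <;> simp [h])]
      simp [pvFilt, pv_modifyHead_fun_id, List.append_assoc]
    · have hd' : ¬ c = '\t' ∧ ¬ c = '\n' := by
        constructor <;> intro h <;> exact hd (by simp [h])
      have hstep : pvStep (out, buf) c = (out, buf ++ [c]) := by
        simp [pvStep, hd]
      rw [hstep, ih, if_neg (by simp [hd'.1, hd'.2])]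
      rw [List.modifyHead_modifyHead]
      congr 2
      apply congrFun
      congr 1
      funext h
      simp

theorem pv_B_eq (text : String) :
    split_input_texts_alt text
      = pvFilt (text.toList.splitOnP (fun c => c == '\t' || c == '\n')) := by
  have hB : split_input_texts_alt text = pvFlush (text.toList.foldl pvStep ([], [])) := rfl
  rw [hB, pv_B_gen]
  obtain ⟨h, t, hht⟩ : ∃ h t, text.toList.splitOnP (fun c => c == '\t' || c == '\n') = h :: t := by
    cases hsp : text.toList.splitOnP (fun c => c == '\t' || c == '\n') with
    | nil => exact absurd hsp (List.splitOnP_ne_nil _ _)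
    | cons h t => exact ⟨h, t, rfl⟩
  rw [hht]
  simp

-- ===== VERDICT (by name: the statement is the Claim_ definition above) =====
theorem split_input_texts_spec : Claim_equal_split_input_texts := by
  intro text _
  unfold Spec_split_input_texts
  rw [pv_A_eq, pv_B_eq]
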